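-- pv_equiv track=rewrite | github.com/DeveloperJose/Python-RockManX8 | src/core/wpg.py | __split_bytes_to_sentences__
-- ===== SOURCE A (Python) =====
-- def __split_bytes_to_sentences__(raw_bytes):
--     split_indices = [0]
--     split_indices.extend([idx + 1 for idx, char_byte in enumerate(raw_bytes) if char_byte == 65533])
--     split_indices.append(len(raw_bytes) + 1)
--     sentences = []
--     max_sentence_len = 0
--     for split_idx, slice_start in enumerate(split_indices):
--         if split_idx >= len(split_indices) - 1:
--             break
--         slice_end = split_indices[split_idx + 1]
--         sentence = raw_bytes[slice_start:slice_end]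
--         max_sentence_len = max(max_sentence_len, len(sentence))
--         sentences.append(sentence)
--     return sentences, max_sentence_len
-- ===== SOURCE B (Python) =====
-- def __split_bytes_to_sentences__(raw_bytes):
--     sentences = []
--     cur = []
--     max_sentence_len = 0
--     for char_byte in raw_bytes:
--         cur.append(char_byte)
--         if char_byte == 65533:
--             sentences.append(cur)
--             max_sentence_len = max(max_sentence_len, len(cur))
--             cur = []
--     sentences.append(cur)
--     max_sentence_len = max(max_sentence_len, len(cur))
--     return sentences, max_sentence_len
-- ===== Notes on version B (the rewrite author's own statement) =====
-- stated objective: simpler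
-- what changed: Replaced the two-phase build-split-index-table-then-slice algorithm with a single streaming pass that accumulates the current sentence and flushes it (delimiter kept) whenever 65533 is seen, appending the trailing remainder at the end; no index list, no enumerate, no slicing.
import Mathlib
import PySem

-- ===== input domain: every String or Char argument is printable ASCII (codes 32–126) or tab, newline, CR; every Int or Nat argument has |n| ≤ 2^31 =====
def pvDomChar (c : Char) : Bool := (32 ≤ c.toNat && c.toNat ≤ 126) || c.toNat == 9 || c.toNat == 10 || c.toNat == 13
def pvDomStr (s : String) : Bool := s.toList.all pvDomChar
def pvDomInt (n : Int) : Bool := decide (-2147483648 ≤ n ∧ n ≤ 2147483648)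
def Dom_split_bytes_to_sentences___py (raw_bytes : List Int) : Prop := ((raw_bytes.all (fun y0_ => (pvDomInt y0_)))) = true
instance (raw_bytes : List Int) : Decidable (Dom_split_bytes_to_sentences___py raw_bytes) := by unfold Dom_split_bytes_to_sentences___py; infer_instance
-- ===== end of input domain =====

-- B replaces A's build-split-index-table-then-slice scheme by one streaming pass that
-- accumulates the current sentence and flushes it on each delimiter (objective: simpler).

-- ===== PORT A =====
-- the for-loop over enumerate(split_indices) with its break, as structural recursion over
-- the enumerated list; split_indices[split_idx+1] is pyGetD (in-range whenever it is read:
-- the break fires on the last index first, so the default 0 is a totality guard only)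
def pvA_loop (raw si : List Int) : List (Int × Int) → List (List Int) × Int → List (List Int) × Int
  | [], st => st
  | (split_idx, slice_start) :: rest, (sentences, max_sentence_len) =>
    if split_idx ≥ (si.length : Int) - 1 then (sentences, max_sentence_len)
    else
      let slice_end := PySem.List.pyGetD si (split_idx + 1) 0
      let sentence := PySem.List.slice raw (some slice_start) (some slice_end)
      pvA_loop raw si rest (sentences ++ [sentence], max max_sentence_len (sentence.length : Int))

def split_bytes_to_sentences___py (raw_bytes : List Int) : List (List Int) × Int :=
  let split_indices : List Int :=
    [(0 : Int)]
      ++ (PySem.List.enumerate raw_bytes 0).filterMap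
           (fun p => if p.2 = 65533 then some (p.1 + 1) else none)
      ++ [(raw_bytes.length : Int) + 1]
  pvA_loop raw_bytes split_indices (PySem.List.enumerate split_indices 0) ([], 0)

-- ===== PORT B =====
-- Source B's single for-loop over raw_bytes, as structural recursion over the same state
def pvB_loop : List Int → List (List Int) → List Int → Int → List (List Int) × List Int × Int
  | [], sentences, cur, max_sentence_len => (sentences, cur, max_sentence_len)
  | char_byte :: rest, sentences, cur, max_sentence_len =>
    let cur' := cur ++ [char_byte]
    if char_byte = 65533 then
      pvB_loop rest (sentences ++ [cur']) [] (max max_sentence_len (cur'.length : Int))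
    else
      pvB_loop rest sentences cur' max_sentence_len

def split_bytes_to_sentences___py_alt (raw_bytes : List Int) : List (List Int) × Int :=
  let st := pvB_loop raw_bytes [] [] 0
  (st.1 ++ [st.2.1], max st.2.2 (st.2.1.length : Int))

-- ===== PRECONDITION & SPEC =====
def Spec_split_bytes_to_sentences___py (raw_bytes : List Int) (out : List (List Int) × Int) : Prop := out = split_bytes_to_sentences___py_alt raw_bytes
instance (raw_bytes : List Int) (out : List (List Int) × Int) : Decidable (Spec_split_bytes_to_sentences___py raw_bytes out) := by unfold Spec_split_bytes_to_sentences___py; infer_instance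

-- ===== CLAIM (what is proved, stated in full; the proofs are below) =====
def Claim_equal_split_bytes_to_sentences___py : Prop := ∀ (raw_bytes : List Int), Dom_split_bytes_to_sentences___py raw_bytes → Spec_split_bytes_to_sentences___py raw_bytes (split_bytes_to_sentences___py raw_bytes)

-- ===== LEMMAS AND PROOFS =====

-- the common splitting spec: sentences of l, delimiter kept, trailing remainder included
def pvS : List Int → List (List Int)
  | [] => [[]]
  | b :: t => if b = 65533 then [b] :: pvS t else (b :: (pvS t).headI) :: (pvS t).tail

lemma pvS_ne_nil (l : List Int) : pvS l ≠ [] := by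
  cases l <;> simp [pvS] <;> split <;> simp

lemma pvS_eq_cons (l : List Int) : pvS l = (pvS l).headI :: (pvS l).tail := by
  cases h : pvS l with
  | nil => exact absurd h (pvS_ne_nil l)
  | cons a t => simp

-- ---------- B side ----------
lemma pvB_loop_eq (l : List Int) : ∀ (sentences : List (List Int)) (cur : List Int) (m : Int),
    ((pvB_loop l sentences cur m).1 ++ [(pvB_loop l sentences cur m).2.1],
       max (pvB_loop l sentences cur m).2.2 (((pvB_loop l sentences cur m).2.1).length : Int))
    = (sentences ++ (cur ++ (pvS l).headI) :: (pvS l).tail,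
       ((cur ++ (pvS l).headI) :: (pvS l).tail).foldl (fun a s => max a (s.length : Int)) m) := by
  induction l with
  | nil => intro sentences cur m; simp [pvB_loop, pvS]
  | cons b t ih =>
    intro sentences cur m
    by_cases hb : b = 65533
    · have h := ih (sentences ++ [cur ++ [b]]) [] (max m ((cur ++ [b]).length : Int))
      simp only [pvB_loop, if_pos hb]
      rw [h]
      simp only [List.nil_append]
      rw [← pvS_eq_cons t]
      simp [pvS, hb]
    · have h := ih sentences (cur ++ [b]) m
      simp only [pvB_loop, if_neg hb]
      rw [h]
      simp [pvS, hb]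

lemma alt_eq (raw : List Int) :
    split_bytes_to_sentences___py_alt raw
    = (pvS raw, (pvS raw).foldl (fun a s => max a (s.length : Int)) 0) := by
  have h := pvB_loop_eq raw [] [] 0
  simp only [List.nil_append] at h
  rw [← pvS_eq_cons raw] at h
  exact h

-- ---------- A side ----------
def pvTail (raw : List Int) : List Int :=
  (PySem.List.enumerate raw 0).filterMap
      (fun p => if p.2 = 65533 then some (p.1 + 1) else none)
    ++ [(raw.length : Int) + 1]

lemma A_eq_loop (raw : List Int) :
    split_bytes_to_sentences___py raw
    = pvA_loop raw (0 :: pvTail raw) (PySem.List.enumerate (0 :: pvTail raw) 0) ([], 0) := rfl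

lemma pvTail_ne_nil (raw : List Int) : pvTail raw ≠ [] := by simp [pvTail]

-- enumerate with shifted start
lemma enumerate_shift (t : List Int) : ∀ s : Int,
    PySem.List.enumerate t (s + 1) = (PySem.List.enumerate t s).map (fun p => (p.1 + 1, p.2)) := by
  induction t with
  | nil => intro s; simp [PySem.List.enumerate_nil]
  | cons b t ih =>
    intro s
    rw [PySem.List.enumerate_cons, PySem.List.enumerate_cons, ih (s + 1)]
    simp

lemma pvTail_cons (b : Int) (t : List Int) :
    pvTail (b :: t)
    = (if b = 65533 then [(1 : Int)] else []) ++ (pvTail t).map (· + 1) := by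
  simp only [pvTail, PySem.List.enumerate_cons, List.filterMap_cons]
  rw [show ((0 : Int) + 1) = (0 : Int) + 1 from rfl, enumerate_shift t 0, List.filterMap_map]
  have hcomp : ((fun p : Int × Int => if p.2 = 65533 then some (p.1 + 1) else none) ∘
          (fun p : Int × Int => (p.1 + 1, p.2)))
       = (fun p : Int × Int =>
            ((if p.2 = 65533 then some (p.1 + 1) else none) : Option Int).map (· + 1)) := by
    funext p
    by_cases h : p.2 = 65533 <;> simp [h]
  rw [hcomp, ← List.map_filterMap]
  by_cases hb : b = 65533 <;> simp [hb, List.map_append] <;> push_cast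

-- every entry of pvTail is nonnegative
lemma pvTail_nonneg (raw : List Int) : ∀ x ∈ pvTail raw, 0 ≤ x := by
  intro x hx
  simp only [pvTail, List.mem_append, List.mem_singleton] at hx
  rcases hx with hx | rfl
  · obtain ⟨p, hp, hpx⟩ := List.mem_filterMap.mp hx
    obtain ⟨k, hk, rfl⟩ := (PySem.List.mem_enumerate_iff _ _ _).mp hp
    split at hpx
    · simp only [Option.some.injEq] at hpx
      omega
    · simp at hpx
  · positivity

-- slicing shift lemmas
lemma slice_shift (b : Int) (t : List Int) (a c : Int) (ha : 0 ≤ a) (hc : 0 ≤ c) :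
    PySem.List.slice (b :: t) (some (a + 1)) (some (c + 1)) = PySem.List.slice t (some a) (some c) := by
  rw [PySem.List.slice_toNat _ (by omega) (by omega), PySem.List.slice_toNat _ ha hc]
  have h1 : (a + 1).toNat = a.toNat + 1 := by omega
  have h2 : (c + 1).toNat = c.toNat + 1 := by omega
  rw [h1, h2]
  simp [List.drop_succ_cons]

lemma slice_zero_succ (b : Int) (t : List Int) (c : Int) (hc : 0 ≤ c) :
    PySem.List.slice (b :: t) (some 0) (some (c + 1)) = b :: PySem.List.slice t (some 0) (some c) := by
  rw [PySem.List.slice_toNat _ (by omega) (by omega), PySem.List.slice_toNat _ (by omega) hc]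
  have h2 : (c + 1).toNat = c.toNat + 1 := by omega
  rw [h2]
  simp

-- the suffix invariant for A's loop
lemma pvA_loop_suffix (raw : List Int) : ∀ (rest pre : List Int) (sents : List (List Int)) (m : Int),
    pvA_loop raw (pre ++ rest) (PySem.List.enumerate rest (pre.length : Int)) (sents, m)
    = (sents ++ (rest.zip rest.tail).map (fun p => PySem.List.slice raw (some p.1) (some p.2)),
       (rest.zip rest.tail).foldl
         (fun a p => max a ((PySem.List.slice raw (some p.1) (some p.2)).length : Int)) m) := by
  intro rest
  induction rest with
  | nil => intro pre sents m; simp [PySem.List.enumerate_nil, pvA_loop]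
  | cons r0 rs ih =>
    intro pre sents m
    rw [PySem.List.enumerate_cons]
    cases rs with
    | nil =>
      have hbr : ((pre.length : Int)) ≥ ((pre ++ [r0]).length : Int) - 1 := by
        simp
      simp only [pvA_loop, if_pos hbr]
      simp
    | cons r1 t =>
      have hbr : ¬ ((pre.length : Int) ≥ ((pre ++ r0 :: r1 :: t).length : Int) - 1) := by
        simp only [List.length_append, List.length_cons]
        push_cast
        omega
      simp only [pvA_loop, if_neg hbr]
      have hget : PySem.List.pyGetD (pre ++ r0 :: r1 :: t) ((pre.length : Int) + 1) 0 = r1 := by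
        have h1 : ((pre.length : Int) + 1) = (((pre ++ [r0]).length : Nat) : Int) := by simp
        rw [h1, PySem.List.pyGetD_natCast]
        have h2 : pre ++ r0 :: r1 :: t = (pre ++ [r0]) ++ r1 :: t := by simp
        rw [h2]
        simp [List.getD]
      rw [hget]
      have h2 : pre ++ r0 :: r1 :: t = (pre ++ [r0]) ++ r1 :: t := by simp
      have h3 : (pre.length : Int) + 1 = (((pre ++ [r0]).length : Nat) : Int) := by simp
      rw [h2, h3, ih (pre ++ [r0])]
      simp

-- main characterisation of A's sentence list
lemma pairs_si_map (raw : List Int) :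
    (((0 :: pvTail raw).zip (pvTail raw)).map
        (fun p => PySem.List.slice raw (some p.1) (some p.2))) = pvS raw := by
  induction raw with
  | nil => decide
  | cons b t ih =>
    obtain ⟨h', r', htt⟩ := List.exists_cons_of_ne_nil (pvTail_ne_nil t)
    have hnn : ∀ x ∈ pvTail t, 0 ≤ x := pvTail_nonneg t
    have hcong : ∀ p ∈ (0 :: pvTail t).zip (pvTail t),
        PySem.List.slice (b :: t) (some (p.1 + 1)) (some (p.2 + 1))
        = PySem.List.slice t (some p.1) (some p.2) := by
      rintro ⟨x, y⟩ hp
      obtain ⟨hx, hy⟩ := List.of_mem_zip hp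
      have hx0 : 0 ≤ x := by
        rcases List.mem_cons.mp hx with rfl | hx'
        · exact le_rfl
        · exact hnn x hx'
      exact slice_shift b t x y hx0 (hnn y hy)
    by_cases hb : b = 65533
    · have e1 : pvTail (b :: t) = (0 :: pvTail t).map (· + 1) := by
        rw [pvTail_cons]
        simp [hb]
      rw [e1]
      have ezip : (0 :: (0 :: pvTail t).map (· + 1)).zip ((0 :: pvTail t).map (· + 1))
          = (0, (1 : Int)) :: (((0 :: pvTail t).zip (pvTail t)).map
              (fun p : Int × Int => (p.1 + 1, p.2 + 1))) := by
        rw [htt]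
        simp only [List.map_cons, List.zip_cons_cons]
        rw [show ((h' + 1) :: r'.map (· + 1) : List Int) = (h' :: r').map (· + 1) from rfl,
            List.zip_map]
        simp [Prod.map]
      rw [ezip, List.map_cons, List.map_map]
      have hhead : PySem.List.slice (b :: t) (some 0) (some 1) = [b] := by
        rw [show (1 : Int) = 0 + 1 from rfl, slice_zero_succ b t 0 le_rfl]
        rw [PySem.List.slice_toNat _ le_rfl le_rfl]
        simp
      rw [hhead]
      have htailmap : (((0 :: pvTail t).zip (pvTail t)).map
          ((fun p : Int × Int => PySem.List.slice (b :: t) (some p.1) (some p.2)) ∘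
           (fun p : Int × Int => (p.1 + 1, p.2 + 1))))
          = ((0 :: pvTail t).zip (pvTail t)).map
              (fun p => PySem.List.slice t (some p.1) (some p.2)) :=
        List.map_congr_left (fun p hp => hcong p hp)
      rw [htailmap, ih]
      simp [pvS, hb]
    · have e1 : pvTail (b :: t) = (pvTail t).map (· + 1) := by
        rw [pvTail_cons]
        simp [hb]
      rw [e1, htt]
      simp only [List.map_cons]
      rw [show ((0 : Int) :: (h' + 1) :: r'.map (· + 1)).zip ((h' + 1) :: r'.map (· + 1))
            = (0, h' + 1) :: ((h' + 1) :: r'.map (· + 1)).zip (r'.map (· + 1)) from rfl]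
      rw [show ((h' + 1) :: r'.map (· + 1)) = ((h' :: r').map (· + 1)) from rfl, List.zip_map]
      rw [List.map_cons, List.map_map]
      have hh0 : 0 ≤ h' := hnn h' (htt ▸ List.mem_cons_self)
      have hhead : PySem.List.slice (b :: t) (some 0) (some (h' + 1))
          = b :: PySem.List.slice t (some 0) (some h') := slice_zero_succ b t h' hh0
      have hcong2 : ∀ p ∈ (h' :: r').zip r',
          ((fun p : Int × Int => PySem.List.slice (b :: t) (some p.1) (some p.2)) ∘
            Prod.map (· + 1) (· + 1)) p
          = PySem.List.slice t (some p.1) (some p.2) := by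
        rintro ⟨x, y⟩ hp
        obtain ⟨hx, hy⟩ := List.of_mem_zip hp
        have hx0 : 0 ≤ x := hnn x (htt ▸ hx)
        have hy0 : 0 ≤ y := hnn y (htt ▸ List.mem_cons_of_mem _ hy)
        exact slice_shift b t x y hx0 hy0
      rw [List.map_congr_left hcong2, hhead]
      have hS : pvS t = PySem.List.slice t (some 0) (some h')
          :: ((h' :: r').zip r').map (fun p => PySem.List.slice t (some p.1) (some p.2)) := by
        rw [← ih, htt]
        rfl
      rw [show pvS (b :: t) = (b :: (pvS t).headI) :: (pvS t).tail by simp [pvS, hb]]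
      rw [hS]
      simp

-- A's result, via the loop invariant and the map characterisation
lemma A_full (raw : List Int) :
    split_bytes_to_sentences___py raw
    = (pvS raw, (pvS raw).foldl (fun a s => max a (s.length : Int)) 0) := by
  have h := pvA_loop_suffix raw (0 :: pvTail raw) [] [] 0
  simp only [List.nil_append, List.length_nil, Nat.cast_zero, List.tail_cons] at h
  rw [A_eq_loop, h, ← pairs_si_map raw, List.foldl_map]

-- ===== VERDICT (by name: the statement is the Claim_ definition above) =====
theorem split_bytes_to_sentences___py_spec : Claim_equal_split_bytes_to_sentences___py := by
  intro raw _
  show _ = _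
  rw [A_full, alt_eq]
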